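-- pv_equiv track=rewrite | github.com/skitela/potential-robot | TOOLS/stage1_shadow_deployer.py | symbol_base
-- ===== SOURCE A (Python) =====
-- from typing import Any, Dict, Iterable, List, Optional, Tuple
--
-- def symbol_base(sym: Any) -> str:
--     s = str(sym or "").strip().upper()
--     if not s:
--         return ""
--     for sep in (".", "-", "_"):
--         if sep in s:
--             s = s.split(sep, 1)[0]
--     return s
-- ===== SOURCE B (Python) =====
-- def symbol_base(sym) -> str:
--     # One left-to-right pass breaking at the first separator, instead of three sequential splits.
--     s = str(sym or "").strip().upper()
--     if not s:
--         return ""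
--     out = []
--     for ch in s:
--         if ch in ".-_":
--             break
--         out.append(ch)
--     return "".join(out)
-- ===== Notes on version B (the rewrite author's own statement) =====
-- stated objective: simpler
-- what changed: Replaces the three sequential split-and-keep-prefix passes with a single left-to-right scan that stops at the first separator character and returns the accumulated prefix.
import Mathlib
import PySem

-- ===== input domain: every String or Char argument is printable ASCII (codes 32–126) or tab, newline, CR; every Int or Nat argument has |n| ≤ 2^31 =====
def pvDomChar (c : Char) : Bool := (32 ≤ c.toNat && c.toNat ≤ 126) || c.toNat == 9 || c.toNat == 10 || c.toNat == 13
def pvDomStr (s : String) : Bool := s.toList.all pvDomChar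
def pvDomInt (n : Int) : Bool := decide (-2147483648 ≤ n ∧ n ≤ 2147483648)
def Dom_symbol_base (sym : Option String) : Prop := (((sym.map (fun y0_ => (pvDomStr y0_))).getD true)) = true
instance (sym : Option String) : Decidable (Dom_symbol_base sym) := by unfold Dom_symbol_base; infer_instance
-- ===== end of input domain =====

-- B replaces A's three sequential split passes by a single scan that stops at the
-- first separator; objective: simpler (one pass, early stop). Equal on all inputs.

-- ===== PORT A =====
-- for sep in (".", "-", "_"): if sep in s: s = s.split(sep, 1)[0]
-- (split with sep ≠ "" always returns a non-empty list, so the [0] never raises;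
-- the getD/headD defaults are unreachable)
def symbol_base (sym : Option String) : String :=
  let s := PySem.Str.upper (PySem.Str.strip
    (match sym with
     | none => ""                               -- sym or "" : None is falsy
     | some t => if t = "" then "" else t))     -- "" is falsy too
  if s = "" then ""
  else
    [".", "-", "_"].foldl
      (fun s sep =>
        if PySem.Str.isIn sep s then (((PySem.Str.splitMax? s sep 1).getD []).headD s)
        else s) s

-- ===== PORT B =====
def pvSepChar (c : Char) : Bool := c == '.' || c == '-' || c == '_'

-- the for-loop with break: accumulate chars until the first separator
def pvTakeToSep : List Char → List Char
  | [] => []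
  | c :: rest => if pvSepChar c then [] else c :: pvTakeToSep rest

def symbol_base_alt (sym : Option String) : String :=
  let s := PySem.Str.upper (PySem.Str.strip
    (match sym with
     | none => ""
     | some t => if t = "" then "" else t))
  if s = "" then ""
  else String.ofList (pvTakeToSep s.toList)    -- "".join(out)

-- ===== PRECONDITION & SPEC =====
def Spec_symbol_base (sym : Option String) (out : String) : Prop := out = symbol_base_alt sym
instance (sym : Option String) (out : String) : Decidable (Spec_symbol_base sym out) := by unfold Spec_symbol_base; infer_instance

-- ===== CLAIM =====
def Claim_equal_symbol_base : Prop := ∀ (sym : Option String), Dom_symbol_base sym → Spec_symbol_base sym (symbol_base sym)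

-- ===== LEMMAS AND PROOFS =====

-- splitOnMax.go with maxsplit 0 just closes the current piece
theorem pv_go_zero (sep : List Char) (fuel : Nat) (l cur : List Char) (acc : List (List Char)) :
    PySem.Chars.splitOnMax.go sep fuel 0 l cur acc = ((cur.reverse ++ l) :: acc).reverse := by
  cases fuel with
  | zero => rfl
  | succ n => cases l with
    | nil => simp [PySem.Chars.splitOnMax.go]
    | cons c rest => simp [PySem.Chars.splitOnMax.go]

-- splitOnMax.go on a single-char sep with maxsplit 1: the first produced piece is
-- cur.reverse ++ the prefix of l before the first occurrence of c
theorem pv_go_one (c : Char) (fuel : Nat) (l cur : List Char) (acc : List (List Char))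
    (h : l.length < fuel) :
    ∃ tail, PySem.Chars.splitOnMax.go [c] fuel 1 l cur acc =
      acc.reverse ++ (cur.reverse ++ l.takeWhile (fun x => !(x == c))) :: tail := by
  induction fuel generalizing l cur acc with
  | zero => omega
  | succ n ih =>
    cases l with
    | nil =>
      refine ⟨[], ?_⟩
      simp [PySem.Chars.splitOnMax.go]
    | cons ch rest =>
      by_cases hc : ch = c
      · refine ⟨[rest], ?_⟩
        subst hc
        simp [PySem.Chars.splitOnMax.go, List.isPrefixOf, pv_go_zero]
      · have h' : rest.length < n := by simp at h; omega
        obtain ⟨tail, ht⟩ := ih rest (ch :: cur) acc h'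
        refine ⟨tail, ?_⟩
        have hpre : [c].isPrefixOf (ch :: rest) = false := by
          simp [List.isPrefixOf]
          exact fun hh => absurd hh.symm hc
        simp only [PySem.Chars.splitOnMax.go]
        simp [hpre, ht, List.takeWhile_cons, hc]

-- one pass of A's loop body equals takeWhile before the separator
theorem pv_stepA (s : String) (c : Char) :
    (if PySem.Str.isIn (String.ofList [c]) s
     then (((PySem.Str.splitMax? s (String.ofList [c]) 1).getD []).headD s)
     else s)
      = String.ofList (s.toList.takeWhile (fun x => !(x == c))) := by
  by_cases hin : PySem.Str.isIn (String.ofList [c]) s = true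
  · obtain ⟨tail, ht⟩ := pv_go_one c (s.toList.length + 1) s.toList [] []
      (by omega)
    simp only [hin, if_pos]
    simp only [String.length_toList] at ht
    simp [PySem.Str.splitMax?, PySem.Chars.splitMax?, PySem.Chars.splitOnMax, ht]
  · have hb : PySem.Str.isIn (String.ofList [c]) s = false := by
      cases hh : PySem.Str.isIn (String.ofList [c]) s
      · rfl
      · exact absurd hh hin
    rw [if_neg (by simpa [PySem.Str.isIn] using hb)]
    have hmem : c ∉ s.toList := by
      have hiff := (PySem.Str.isIn_iff_infix (sub := String.ofList [c]) (s := s))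
      intro hc
      exact hin (hiff.mpr (by simpa [List.singleton_infix_iff] using hc))
    rw [List.takeWhile_eq_self_iff.mpr ?_, String.ofList_toList]
    intro x hx
    simp only [ne_eq, Bool.not_eq_eq_eq_not, Bool.not_true, beq_eq_false_iff_ne]
    exact fun he => hmem (he ▸ hx)

-- three chained takeWhiles equal the single-pass scan
theorem pv_chain (l : List Char) :
    ((l.takeWhile (fun x => !(x == '.'))).takeWhile (fun x => !(x == '-'))).takeWhile
        (fun x => !(x == '_')) = pvTakeToSep l := by
  induction l with
  | nil => rfl
  | cons c rest ih =>
    by_cases h : pvSepChar c = true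
    · simp [pvSepChar] at h
      rcases h with (h | h) | h <;> subst h <;> simp [pvTakeToSep, pvSepChar]
    · simp [pvSepChar] at h
      obtain ⟨⟨h1, h2⟩, h3⟩ := h
      simp [pvTakeToSep, pvSepChar, h1, h2, h3, ih]

-- the whole three-step fold of A equals the chained takeWhiles
theorem pv_fold (t : String) :
    [".", "-", "_"].foldl
      (fun s sep =>
        if PySem.Str.isIn sep s then (((PySem.Str.splitMax? s sep 1).getD []).headD s)
        else s) t
    = String.ofList (((t.toList.takeWhile (fun x => !(x == '.'))).takeWhile
        (fun x => !(x == '-'))).takeWhile (fun x => !(x == '_'))) := by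
  have e1 : ("." : String) = String.ofList ['.'] := rfl
  have e2 : ("-" : String) = String.ofList ['-'] := rfl
  have e3 : ("_" : String) = String.ofList ['_'] := rfl
  simp only [List.foldl, e1, e2, e3, pv_stepA, String.toList_ofList]

-- ===== VERDICT =====
theorem symbol_base_spec : Claim_equal_symbol_base := by
  intro sym _
  unfold Spec_symbol_base
  simp only [symbol_base, symbol_base_alt]
  split_ifs with h
  · rfl
  · rw [pv_fold, pv_chain]
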